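-- pv_equiv track=rewrite | github.com/gollor7/ogorod | workout_test/for_stdn_A/handlers.py | append_ids_to_names
-- ===== SOURCE A (Python) =====
-- def append_ids_to_names(data, start_id=1):
--     result = {}
--     current_id = start_id
--     for group_key, items in data.items():
--         result[group_key] = {}
--         for name, score in items.items():
--             new_name = f"{name}:{current_id}"
--             result[group_key][new_name] = score
--             current_id += 1
--     return result, current_id
-- ===== SOURCE B (Python) =====
-- def append_ids_to_names(data, start_id=1):
--     # Phase 1: sizes of all groups and cumulative base offsets (prefix sums).
--     sizes = [len(items) for items in data.values()]
--     offsets = [start_id]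
--     for n in sizes:
--         offsets.append(offsets[-1] + n)
--     # Phase 2: build each group independently; IDs come from index arithmetic.
--     result = {
--         gk: {f"{name}:{base + i}": score
--              for i, (name, score) in enumerate(items.items())}
--         for (gk, items), base in zip(data.items(), offsets)
--     }
--     return result, offsets[-1]
-- ===== Notes on version B (the rewrite author's own statement) =====
-- stated objective: alternative
-- what changed: Replaces the counter threaded through a single nested loop by a two-phase decomposition: first compute group sizes and cumulative base offsets via prefix sums, then build every group's inner dict independently with enumerate and index arithmetic.
import Mathlib
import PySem

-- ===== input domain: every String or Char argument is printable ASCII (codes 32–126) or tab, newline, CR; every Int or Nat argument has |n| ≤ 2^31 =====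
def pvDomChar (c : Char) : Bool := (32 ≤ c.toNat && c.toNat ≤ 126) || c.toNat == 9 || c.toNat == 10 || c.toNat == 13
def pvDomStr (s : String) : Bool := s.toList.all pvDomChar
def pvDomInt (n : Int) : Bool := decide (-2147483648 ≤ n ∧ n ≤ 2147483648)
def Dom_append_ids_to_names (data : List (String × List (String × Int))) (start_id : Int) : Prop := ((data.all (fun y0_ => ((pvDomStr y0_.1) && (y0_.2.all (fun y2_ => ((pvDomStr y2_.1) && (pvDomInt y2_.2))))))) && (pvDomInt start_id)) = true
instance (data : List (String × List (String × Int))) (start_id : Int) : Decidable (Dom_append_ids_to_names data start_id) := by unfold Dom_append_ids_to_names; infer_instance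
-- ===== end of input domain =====

-- B replaces A's counter threaded through one nested loop by a two-phase decomposition
-- (group sizes, prefix-sum base offsets, then independent group builds via enumerate);
-- equal cost (objective: alternative).

-- ===== PORT A =====
-- inner loop body: result[group_key][new_name] = score; current_id += 1
-- (the key gk is always present here, so modify with default empty is exact)
def pvAInner (gk : String) (st2 : PySem.Dict String (PySem.Dict String Int) × Int)
    (it : String × Int) : PySem.Dict String (PySem.Dict String Int) × Int :=
  (PySem.Dict.modify st2.1 gk PySem.Dict.empty
     (fun inner => inner.insert (it.1 ++ ":" ++ PySem.Int.toStr st2.2) it.2),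
   st2.2 + 1)

-- outer loop body: result[group_key] = {}; then the inner loop over items
def pvAStep (st : PySem.Dict String (PySem.Dict String Int) × Int)
    (g : String × List (String × Int)) : PySem.Dict String (PySem.Dict String Int) × Int :=
  g.2.foldl (pvAInner g.1) (st.1.insert g.1 PySem.Dict.empty, st.2)

def append_ids_to_names (data : List (String × List (String × Int))) (start_id : Int) :
    (List (String × List (String × Int))) × Int :=
  let st := data.foldl pvAStep (PySem.Dict.empty, start_id)
  (st.1.items.map (fun p => (p.1, p.2.items)), st.2)

-- ===== PORT B =====
-- offsets.append(offsets[-1] + n)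
def pvOffStep (acc : List Int) (n : Int) : List Int :=
  acc ++ [PySem.List.pyGetD acc (-1) 0 + n]

-- one entry of the inner dict comprehension: f"{name}:{base + i}": score
def pvBInner (base : Int) (inner : PySem.Dict String Int) (q : Int × (String × Int)) :
    PySem.Dict String Int :=
  inner.insert (q.2.1 ++ ":" ++ PySem.Int.toStr (base + q.1)) q.2.2

-- one group's inner dict, built from enumerate(items.items())
def pvBGroup (items : List (String × Int)) (base : Int) : PySem.Dict String Int :=
  (PySem.List.enumerate items).foldl (pvBInner base) PySem.Dict.empty

-- one entry of the outer dict comprehension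
def pvBStep (r : PySem.Dict String (PySem.Dict String Int))
    (p : (String × List (String × Int)) × Int) : PySem.Dict String (PySem.Dict String Int) :=
  r.insert p.1.1 (pvBGroup p.1.2 p.2)

def append_ids_to_names_alt (data : List (String × List (String × Int))) (start_id : Int) :
    (List (String × List (String × Int))) × Int :=
  let sizes : List Int := data.map (fun g => (g.2.length : Int))
  let offsets : List Int := sizes.foldl pvOffStep [start_id]
  let result := (data.zip offsets).foldl pvBStep PySem.Dict.empty
  (result.items.map (fun p => (p.1, p.2.items)), PySem.List.pyGetD offsets (-1) 0)

-- ===== PRECONDITION & SPEC =====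
def Spec_append_ids_to_names (data : List (String × List (String × Int))) (start_id : Int) (out : (List (String × List (String × Int))) × Int) : Prop := out = append_ids_to_names_alt data start_id
instance (data : List (String × List (String × Int))) (start_id : Int) (out : (List (String × List (String × Int))) × Int) : Decidable (Spec_append_ids_to_names data start_id out) := by unfold Spec_append_ids_to_names; infer_instance

-- ===== CLAIM (what is proved, stated in full; the proofs are below) =====
def Claim_equal_append_ids_to_names : Prop := ∀ (data : List (String × List (String × Int))) (start_id : Int), Dom_append_ids_to_names data start_id → Spec_append_ids_to_names data start_id (append_ids_to_names data start_id)

-- ===== LEMMAS AND PROOFS =====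

-- prefix-sum list: pvOff x [n₁, n₂, …] = [x+n₁, x+n₁+n₂, …]
def pvOff (x : Int) : List Int → List Int
  | [] => []
  | n :: ns => (x + n) :: pvOff (x + n) ns

-- d[k] = f(d[k]) on a dict whose entry at k was just written: overwrite in place
theorem pv_modify_insert {κ ν : Type} [BEq κ] [LawfulBEq κ] (r : PySem.Dict κ ν) (k : κ)
    (d d0 : ν) (f : ν → ν) : (r.insert k d).modify k d0 f = r.insert k (f d) := by
  have h : (r.insert k d).modify k d0 f
      = (r.insert k d).insert k (f ((r.insert k d).getD k d0)) := rfl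
  rw [h, PySem.Dict.getD_insert_self, PySem.Dict.insert_insert_self]

theorem pvOffsets (s : List Int) : ∀ (pre : List Int) (x : Int),
    s.foldl pvOffStep (pre ++ [x]) = pre ++ x :: pvOff x s := by
  induction s with
  | nil => intro pre x; simp [pvOff]
  | cons n ns ih =>
      intro pre x
      have h1 : pvOffStep (pre ++ [x]) n = (pre ++ [x]) ++ [x + n] := by
        simp [pvOffStep, PySem.List.pyGetD_neg_one_append_singleton]
      rw [List.foldl_cons, h1, ih (pre ++ [x]) (x + n)]
      simp [pvOff]

theorem pvLast (s : List Int) : ∀ (x : Int),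
    PySem.List.pyGetD (x :: pvOff x s) (-1) 0 = x + s.sum := by
  induction s with
  | nil =>
      intro x
      have := PySem.List.pyGetD_neg_one_append_singleton ([] : List Int) x 0
      simpa [pvOff] using this
  | cons n ns ih =>
      intro x
      have h1 : PySem.List.pyGetD (x :: (x + n) :: pvOff (x + n) ns) (-1) 0
          = PySem.List.pyGetD ((x + n) :: pvOff (x + n) ns) (-1) 0 := by
        simp [PySem.List.pyGetD_neg_one]
      rw [show pvOff x (n :: ns) = (x + n) :: pvOff (x + n) ns from rfl, h1, ih (x + n)]
      simp [List.sum_cons]; ring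

theorem pvInner (items : List (String × Int)) (gk : String) (base : Int) :
    ∀ (j : Int) (d : PySem.Dict String Int) (r : PySem.Dict String (PySem.Dict String Int)),
    items.foldl (pvAInner gk) (r.insert gk d, base + j)
      = (r.insert gk ((PySem.List.enumerate items j).foldl (pvBInner base) d),
         base + j + items.length) := by
  induction items with
  | nil => intro j d r; simp [PySem.List.enumerate_nil]
  | cons it its ih =>
      intro j d r
      have h1 : pvAInner gk (r.insert gk d, base + j) it
          = (r.insert gk (d.insert (it.1 ++ ":" ++ PySem.Int.toStr (base + j)) it.2),
             base + j + 1) := by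
        simp only [pvAInner, pv_modify_insert]
      rw [List.foldl_cons, h1,
        show base + j + 1 = base + (j + 1) by ring,
        ih (j + 1) (d.insert (it.1 ++ ":" ++ PySem.Int.toStr (base + j)) it.2) r,
        PySem.List.enumerate_cons]
      simp only [List.foldl_cons, pvBInner, List.length_cons, Prod.mk.injEq]
      exact ⟨trivial, by push_cast; ring⟩

theorem pvOuter (data : List (String × List (String × Int))) :
    ∀ (x : Int) (r : PySem.Dict String (PySem.Dict String Int)),
    data.foldl pvAStep (r, x)
      = ((data.zip (x :: pvOff x (data.map (fun g => (g.2.length : Int))))).foldl pvBStep r,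
         x + (data.map (fun g => (g.2.length : Int))).sum) := by
  induction data with
  | nil => intro x r; simp
  | cons g gs ih =>
      intro x r
      have h1 : pvAStep (r, x) g
          = (r.insert g.1 (pvBGroup g.2 x), x + (g.2.length : Int)) := by
        have := pvInner g.2 g.1 x 0 PySem.Dict.empty r
        simp only [add_zero] at this
        simpa [pvAStep, pvBGroup] using this
      rw [List.foldl_cons, h1, ih (x + (g.2.length : Int)) (r.insert g.1 (pvBGroup g.2 x))]
      simp only [List.map_cons, List.zip_cons_cons, List.foldl_cons, List.sum_cons,
        show pvOff x ((g.2.length : Int) :: gs.map (fun g => (g.2.length : Int)))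
          = (x + (g.2.length : Int)) :: pvOff (x + (g.2.length : Int))
              (gs.map (fun g => (g.2.length : Int))) from rfl]
      simp only [pvBStep, Prod.mk.injEq]
      exact ⟨trivial, by ring⟩

-- ===== VERDICT (by name: the statement is the Claim_ definition above) =====
theorem append_ids_to_names_spec : Claim_equal_append_ids_to_names := by
  intro data start_id _
  unfold Spec_append_ids_to_names append_ids_to_names append_ids_to_names_alt
  have hoff : (data.map (fun g => (g.2.length : Int))).foldl pvOffStep [start_id]
      = start_id :: pvOff start_id (data.map (fun g => (g.2.length : Int))) := by
    simpa using pvOffsets (data.map (fun g => (g.2.length : Int))) [] start_id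
  simp only [hoff, pvOuter data start_id PySem.Dict.empty, pvLast]
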